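-- pv_equiv track=rewrite | github.com/hegeldev/hegel-go | scripts/check-readme-examples.py | extract_go_blocks_from_godoc
-- ===== SOURCE A (Python) =====
-- def extract_go_blocks_from_godoc(source: str) -> list[str]:
--     """Return code blocks from the package doc comment in a .go file.
--
--     In Go doc comments, code blocks are contiguous runs of lines where the
--     content after the '//' prefix starts with a tab character.
--     """
--     doc_lines = []
--     for line in source.splitlines():
--         stripped = line.lstrip()
--         if stripped.startswith("//"):
--             # Strip the // prefix and at most one space
--             after = stripped[2:]
--             if after.startswith(" "):
--                 after = after[1:]
--             doc_lines.append(after)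
--         elif stripped.startswith("package "):
--             break
--         elif stripped == "":
--             continue
--         else:
--             break
--
--     blocks = []
--     current_block: list[str] = []
--     for line in doc_lines:
--         if line.startswith("\t"):
--             current_block.append(line[1:])  # strip leading tab
--         else:
--             if current_block:
--                 blocks.append("\n".join(current_block).strip())
--                 current_block = []
--     if current_block:
--         blocks.append("\n".join(current_block).strip())
--     return blocks
-- ===== SOURCE B (Python) =====
-- def _tab_run(lines):
--     k = 0
--     while k < len(lines) and lines[k].startswith("\t"):
--         k += 1
--     return k
--
--
-- def _blocks(doc):
--     blocks = []
--     while doc: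
--         line, rest = doc[0], doc[1:]
--         if line.startswith("\t"):
--             k = _tab_run(rest)
--             blocks.append("\n".join(x[1:] for x in [line] + rest[:k]).strip())
--             doc = rest[k:]
--         else:
--             doc = rest
--     return blocks
--
--
-- def extract_go_blocks_from_godoc(source: str) -> list[str]:
--     doc = []
--     for line in source.splitlines():
--         s = line.lstrip()
--         if s.startswith("//"):
--             a = s[2:]
--             doc.append(a[1:] if a.startswith(" ") else a)
--         elif s:
--             break
--     return _blocks(doc)
-- ===== Notes on version B (the rewrite author's own statement) =====
-- stated objective: alternative
-- what changed: Phase 1 merges the 'package ' and other-line terminators into one non-empty-line break and phase 2 replaces the flush-on-non-tab accumulator with a run-scan that measures each tab run up front and emits the joined block directly.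
import Mathlib
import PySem

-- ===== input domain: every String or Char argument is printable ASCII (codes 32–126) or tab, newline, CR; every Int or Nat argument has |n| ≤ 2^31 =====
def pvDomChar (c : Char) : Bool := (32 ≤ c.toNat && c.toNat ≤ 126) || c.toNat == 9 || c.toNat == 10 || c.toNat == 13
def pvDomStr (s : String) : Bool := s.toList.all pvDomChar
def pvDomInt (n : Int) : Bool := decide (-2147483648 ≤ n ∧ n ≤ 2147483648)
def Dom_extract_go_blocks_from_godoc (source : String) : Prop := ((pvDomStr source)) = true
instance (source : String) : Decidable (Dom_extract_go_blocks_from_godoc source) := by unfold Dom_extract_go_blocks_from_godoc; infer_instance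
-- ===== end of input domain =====

-- B reworks both passes: one non-empty-line terminator in the doc scan, and a run-scan
-- (instead of A's flush-on-non-tab accumulator) that emits each tab run as a block directly.

-- ===== PORT A =====
def pvA_docLoop (acc : List String) : List String → List String
  | [] => acc
  | line :: rest =>
    let stripped := PySem.Str.lstrip line
    if PySem.Str.startswith stripped "//" then
      let after := PySem.Str.slice stripped (some 2) none
      let after := if PySem.Str.startswith after " " then PySem.Str.slice after (some 1) none else after
      pvA_docLoop (acc ++ [after]) rest
    else if PySem.Str.startswith stripped "package " then acc
    else if stripped = "" then pvA_docLoop acc rest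
    else acc

def pvA_blockLoop (blocks cur : List String) : List String → List String
  | [] => if cur.isEmpty then blocks else blocks ++ [PySem.Str.strip (PySem.Str.join "\n" cur)]
  | line :: rest =>
    if PySem.Str.startswith line "\t" then
      pvA_blockLoop blocks (cur ++ [PySem.Str.slice line (some 1) none]) rest
    else if cur.isEmpty then
      pvA_blockLoop blocks cur rest
    else
      pvA_blockLoop (blocks ++ [PySem.Str.strip (PySem.Str.join "\n" cur)]) [] rest

def extract_go_blocks_from_godoc (source : String) : List String :=
  pvA_blockLoop [] [] (pvA_docLoop [] (PySem.Str.splitlines source))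

-- ===== PORT B =====
def pvB_docLoop (acc : List String) : List String → List String
  | [] => acc
  | line :: rest =>
    let s := PySem.Str.lstrip line
    if PySem.Str.startswith s "//" then
      let a := PySem.Str.slice s (some 2) none
      pvB_docLoop (acc ++ [if PySem.Str.startswith a " " then PySem.Str.slice a (some 1) none else a]) rest
    else if s ≠ "" then acc
    else pvB_docLoop acc rest

def pvB_tabRun : List String → Nat
  | [] => 0
  | l :: t => if PySem.Str.startswith l "\t" then 1 + pvB_tabRun t else 0

def pvB_blocks : List String → List String
  | [] => []
  | line :: rest =>
    if PySem.Str.startswith line "\t" then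
      let k := pvB_tabRun rest
      PySem.Str.strip (PySem.Str.join "\n"
          ((line :: rest.take k).map (fun x => PySem.Str.slice x (some 1) none)))
        :: pvB_blocks (rest.drop k)
    else pvB_blocks rest
  termination_by xs => xs.length
  decreasing_by
  all_goals simp

def extract_go_blocks_from_godoc_alt (source : String) : List String :=
  pvB_blocks (pvB_docLoop [] (PySem.Str.splitlines source))

-- ===== PRECONDITION & SPEC =====
def Spec_extract_go_blocks_from_godoc (source : String) (out : List String) : Prop := out = extract_go_blocks_from_godoc_alt source
instance (source : String) (out : List String) : Decidable (Spec_extract_go_blocks_from_godoc source out) := by unfold Spec_extract_go_blocks_from_godoc; infer_instance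

-- ===== CLAIM (what is proved, stated in full; the proofs are below) =====
def Claim_equal_extract_go_blocks_from_godoc : Prop := ∀ (source : String), Dom_extract_go_blocks_from_godoc source → Spec_extract_go_blocks_from_godoc source (extract_go_blocks_from_godoc source)

-- ===== LEMMAS AND PROOFS =====

lemma pvB_blocks_cons_tab (line : String) (rest : List String)
    (h : PySem.Str.startswith line "\t" = true) :
    pvB_blocks (line :: rest) =
      PySem.Str.strip (PySem.Str.join "\n"
          ((line :: rest.take (pvB_tabRun rest)).map (fun x => PySem.Str.slice x (some 1) none)))
        :: pvB_blocks (rest.drop (pvB_tabRun rest)) := by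
  have h' : PySem.Chars.startswith line.toList ['\t'] = true := by simpa using h
  rw [pvB_blocks]; simp [h']

lemma pvB_blocks_cons_nontab (line : String) (rest : List String)
    (h : PySem.Str.startswith line "\t" = false) :
    pvB_blocks (line :: rest) = pvB_blocks rest := by
  have h' : PySem.Chars.startswith line.toList ['\t'] = false := by simpa using h
  rw [pvB_blocks]; simp [h']

lemma docLoop_eq (lines : List String) : ∀ acc, pvA_docLoop acc lines = pvB_docLoop acc lines := by
  induction lines with
  | nil => intro acc; rfl
  | cons line rest ih =>
    intro acc
    simp only [pvA_docLoop, pvB_docLoop]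
    by_cases hc : PySem.Str.startswith (PySem.Str.lstrip line) "//" = true
    · rw [if_pos hc, if_pos hc]; exact ih _
    · rw [if_neg hc, if_neg hc]
      by_cases he : PySem.Str.lstrip line = ""
      · have hp : ¬ (PySem.Str.startswith (PySem.Str.lstrip line) "package " = true) := by
          rw [he]; decide
        rw [if_neg hp, if_pos he, if_neg (by simp [he])]
        exact ih _
      · by_cases hp : PySem.Str.startswith (PySem.Str.lstrip line) "package " = true
        · rw [if_pos hp, if_pos he]
        · rw [if_neg hp, if_neg he, if_pos he]

lemma blockLoop_acc (doc : List String) : ∀ blocks cur,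
    pvA_blockLoop blocks cur doc = blocks ++ pvA_blockLoop [] cur doc := by
  induction doc with
  | nil =>
    intro blocks cur
    simp only [pvA_blockLoop]
    by_cases h : cur.isEmpty <;> simp [h]
  | cons line rest ih =>
    intro blocks cur
    simp only [pvA_blockLoop]
    by_cases ht : PySem.Str.startswith line "\t" = true
    · rw [if_pos ht, if_pos ht, ih, ih [] _]
    · rw [if_neg ht, if_neg ht]
      by_cases hc : cur.isEmpty
      · rw [if_pos hc, if_pos hc, ih, ih [] _]
      · rw [if_neg hc, if_neg hc, ih,
          ih ([] ++ [PySem.Str.strip (PySem.Str.join "\n" cur)])]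
        simp

lemma blockLoop_eq_aux : ∀ n (doc : List String), doc.length ≤ n →
    (pvA_blockLoop [] [] doc = pvB_blocks doc) ∧
    (∀ cur : List String, cur ≠ [] →
      pvA_blockLoop [] cur doc =
        PySem.Str.strip (PySem.Str.join "\n"
            (cur ++ (doc.take (pvB_tabRun doc)).map (fun x => PySem.Str.slice x (some 1) none)))
          :: pvB_blocks (doc.drop (pvB_tabRun doc))) := by
  intro n
  induction n with
  | zero =>
    intro doc hlen
    have : doc = [] := List.length_eq_zero_iff.mp (Nat.le_zero.mp hlen)
    subst this
    constructor
    · simp [pvA_blockLoop, pvB_blocks]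
    · intro cur hcur
      simp [pvA_blockLoop, pvB_blocks, pvB_tabRun, List.isEmpty_iff, hcur]
  | succ n ih =>
    intro doc hlen
    cases doc with
    | nil =>
      constructor
      · simp [pvA_blockLoop, pvB_blocks]
      · intro cur hcur
        simp [pvA_blockLoop, pvB_blocks, pvB_tabRun, List.isEmpty_iff, hcur]
    | cons line rest =>
      have hrest : rest.length ≤ n := by
        simpa using Nat.le_of_succ_le_succ (by simpa using hlen)
      have ihr := ih rest hrest
      constructor
      · -- main: empty accumulator
        simp only [pvA_blockLoop]
        by_cases ht : PySem.Str.startswith line "\t" = true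
        · rw [if_pos ht, pvB_blocks_cons_tab line rest ht]
          have h2 := ihr.2 [PySem.Str.slice line (some 1) none] (by simp)
          simp only [List.nil_append]
          rw [h2]
          simp
        · rw [if_neg ht, if_pos (by simp : ([] : List String).isEmpty = true),
            pvB_blocks_cons_nontab line rest (by simpa using ht)]
          exact ihr.1
      · -- nonempty accumulator
        intro cur hcur
        simp only [pvA_blockLoop, pvB_tabRun]
        by_cases ht : PySem.Str.startswith line "\t" = true
        · rw [if_pos ht, if_pos ht]
          have h2 := ihr.2 (cur ++ [PySem.Str.slice line (some 1) none]) (by simp)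
          rw [h2, Nat.add_comm 1 (pvB_tabRun rest)]
          simp [List.take_succ_cons, List.drop_succ_cons]
        · rw [if_neg ht, if_neg ht,
            if_neg (by simp [List.isEmpty_iff, hcur] : ¬ cur.isEmpty = true)]
          rw [blockLoop_acc, ihr.1]
          simp only [List.take_zero, List.drop_zero, List.map_nil, List.append_nil,
            List.nil_append]
          rw [pvB_blocks_cons_nontab line rest (by simpa using ht)]
          simp

theorem extract_go_blocks_from_godoc_spec' (source : String) :
    extract_go_blocks_from_godoc source = extract_go_blocks_from_godoc_alt source := by
  unfold extract_go_blocks_from_godoc extract_go_blocks_from_godoc_alt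
  rw [docLoop_eq]
  exact (blockLoop_eq_aux _ _ le_rfl).1

-- ===== VERDICT (by name: the statement is the Claim_ definition above) =====
theorem extract_go_blocks_from_godoc_spec : Claim_equal_extract_go_blocks_from_godoc := by
  intro source _
  exact extract_go_blocks_from_godoc_spec' source
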